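-- pv_equiv track=rewrite | github.com/goldenrockefeller/fft-prototype | fft_prototype.py | scrambled_flip
-- ===== SOURCE A (Python) =====
-- def scrambled_flip(signal):
--     start_id = 2
--     section_len = 2
--     new_signal = [0] * len(signal)
--     new_signal[0] = signal[0]
--     new_signal[1] = signal[1]
--     while start_id < len(signal):
--         a = start_id
--         b = start_id + section_len - 1
--         for i in range(section_len):
--             new_signal[a] = signal[b]
--             a += 1
--             b -= 1
--         start_id += section_len
--         section_len = section_len << 1
--     return new_signal
-- ===== SOURCE B (Python) =====
-- def scrambled_flip(sig):
--     out = [sig[0], sig[1]]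
--     for i in range(2, len(sig)):
--         block = 1 << (i.bit_length() - 1)
--         out.append(sig[3 * block - 1 - i])
--     return out
-- ===== Notes on version B (the rewrite author's own statement) =====
-- stated objective: simpler
-- what changed: Replaces the nested while/for block-reversal loop with its mutable start/section-length/a/b state by a single flat loop that computes each output element directly from the closed-form mirror index 3*2^(i.bit_length()-1) - 1 - i; Pre_ excludes inputs on which A raises IndexError (length < 2 or not a power of two), where B raises too.
import Mathlib
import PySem

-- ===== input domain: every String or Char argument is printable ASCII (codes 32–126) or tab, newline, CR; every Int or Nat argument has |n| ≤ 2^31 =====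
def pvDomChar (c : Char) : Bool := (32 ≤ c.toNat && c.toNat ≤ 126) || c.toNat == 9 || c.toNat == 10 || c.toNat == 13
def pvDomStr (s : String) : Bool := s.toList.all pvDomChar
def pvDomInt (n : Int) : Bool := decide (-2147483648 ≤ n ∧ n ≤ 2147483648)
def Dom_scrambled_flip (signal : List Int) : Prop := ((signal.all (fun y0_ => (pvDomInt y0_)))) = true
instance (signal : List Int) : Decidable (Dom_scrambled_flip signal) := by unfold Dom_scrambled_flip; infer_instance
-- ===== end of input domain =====

-- B replaces A's nested while/for block-reversal loop (mutable start_id/section_len/a/b state)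
-- with one flat loop over the indices using the closed-form mirror index 3*2^(i.bit_length()-1)-1-i; objective: simpler.


-- ===== PORT A =====
-- inner `for i in range(section_len)` loop: state (new_signal, a, b); exact inside Pre_
-- (all indices in range there; an out-of-range read defaults to 0 in the port, where Python
-- raises IndexError — exactly those inputs are excluded by Pre_).
def pvInnerA (signal : List Int) : Nat → List Int → Int → Int → List Int
  | 0, ns, _, _ => ns
  | c + 1, ns, a, b =>
      pvInnerA signal c (ns.set a.toNat ((PySem.List.pyGet? signal b).getD 0)) (a + 1) (b - 1)

-- the `while start_id < len(signal)` loop; the fuel argument only makes the recursion total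
-- (start_id grows by section_len ≥ 2 each round, so len(signal) rounds are always enough).
def pvOuterA (signal : List Int) : Nat → List Int → Int → Int → List Int
  | 0, ns, _, _ => ns
  | f + 1, ns, start_id, section_len =>
      if start_id < (signal.length : Int) then
        pvOuterA signal f
          (pvInnerA signal section_len.toNat ns start_id (start_id + section_len - 1))
          (start_id + section_len) (section_len <<< (1:Nat))
      else ns

def scrambled_flip (signal : List Int) : List Int :=
  let ns0 := List.replicate signal.length (0 : Int)
  let ns1 := ns0.set 0 ((PySem.List.pyGet? signal 0).getD 0)
  let ns2 := ns1.set 1 ((PySem.List.pyGet? signal 1).getD 0)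
  pvOuterA signal signal.length ns2 2 2

-- ===== PORT B =====
def scrambled_flip_alt (signal : List Int) : List Int :=
  let out := [(PySem.List.pyGet? signal 0).getD 0, (PySem.List.pyGet? signal 1).getD 0]
  (List.range' 2 (signal.length - 2)).foldl
    (fun out (i : Nat) =>
      let k := PySem.Int.bitLength (i : Int) - 1
      out ++ [(PySem.List.pyGet? signal (3 * ((1 : Int) <<< k) - 1 - (i : Int))).getD 0]) out

-- ===== PRECONDITION & SPEC =====
-- Pre_ excludes exactly the inputs on which the Python A raises IndexError: lengths < 2 and
-- lengths that are not a power of two (B raises IndexError on all of those as well).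
def Pre_scrambled_flip (signal : List Int) : Prop :=
  2 ≤ signal.length ∧ signal.length = 2 ^ Nat.log2 signal.length
instance (signal : List Int) : Decidable (Pre_scrambled_flip signal) := by
  unfold Pre_scrambled_flip; infer_instance
def pvWitness_scrambled_flip : List Int := [5, -3, 7, 9]

def Spec_scrambled_flip (signal : List Int) (out : List Int) : Prop := out = scrambled_flip_alt signal
instance (signal : List Int) (out : List Int) : Decidable (Spec_scrambled_flip signal out) := by unfold Spec_scrambled_flip; infer_instance

-- ===== CLAIM (what is proved, stated in full; the proofs are below) =====
def Claim_equal_scrambled_flip : Prop := ∀ (signal : List Int), Dom_scrambled_flip signal → Pre_scrambled_flip signal → Spec_scrambled_flip signal (scrambled_flip signal)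

-- ===== LEMMAS AND PROOFS =====

-- the value both programs place at output index j (inside Pre_)
def pvE (signal : List Int) (j : Nat) : Int :=
  if j < 2 then signal.getD j 0 else signal.getD (3 * 2 ^ Nat.log2 j - 1 - j) 0

lemma pvInnerA_length (signal : List Int) :
    ∀ (c : Nat) (ns : List Int) (a b : Int), (pvInnerA signal c ns a b).length = ns.length := by
  intro c
  induction c with
  | zero => intro ns a b; rfl
  | succ c ih => intro ns a b; simp [pvInnerA, ih]

lemma pvOuterA_length (signal : List Int) :
    ∀ (f : Nat) (ns : List Int) (a b : Int), (pvOuterA signal f ns a b).length = ns.length := by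
  intro f
  induction f with
  | zero => intro ns a b; rfl
  | succ f ih =>
    intro ns a b
    show (if a < (signal.length : Int) then _ else ns).length = ns.length
    split
    · rw [ih, pvInnerA_length]
    · rfl

lemma pvInnerA_getElem? (signal : List Int) :
    ∀ (c : Nat) (ns : List Int) (a b : Nat), c ≤ b + 1 → ∀ j, j < ns.length →
    (pvInnerA signal c ns (a : Int) (b : Int))[j]? =
      if a ≤ j ∧ j < a + c then
        some ((PySem.List.pyGet? signal ((b - (j - a) : Nat) : Int)).getD 0)
      else ns[j]? := by
  intro c
  induction c with
  | zero =>
    intro ns a b _ j hj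
    have hcond : ¬ (a ≤ j ∧ j < a + 0) := by omega
    rw [if_neg hcond]
    rfl
  | succ c ih =>
    intro ns a b hcb j hj
    rcases Nat.eq_zero_or_pos c with hc | hc
    · subst hc
      show (ns.set (a:Int).toNat ((PySem.List.pyGet? signal (b:Int)).getD 0))[j]? = _
      rcases eq_or_ne j a with heq | hne
      · subst heq
        rw [if_pos (by omega), Int.toNat_natCast, List.getElem?_set_self hj]
        simp
      · rw [if_neg (by omega), Int.toNat_natCast, List.getElem?_set_ne (by omega)]
    · have e1 : (a : Int) + 1 = ((a + 1 : Nat) : Int) := by push_cast; ring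
      have e2 : (b : Int) - 1 = ((b - 1 : Nat) : Int) := by omega
      rw [show pvInnerA signal (c+1) ns (a:Int) (b:Int) =
        pvInnerA signal c (ns.set (a:Int).toNat ((PySem.List.pyGet? signal (b:Int)).getD 0))
          ((a:Int)+1) ((b:Int)-1) from rfl, e1, e2, Int.toNat_natCast]
      rw [ih _ (a+1) (b-1) (by omega) j (by simpa using hj)]
      rcases eq_or_ne j a with heq | hne
      · subst heq
        rw [if_neg (by omega), if_pos (by omega), List.getElem?_set_self hj]
        simp
      · by_cases hin : a + 1 ≤ j ∧ j < a + 1 + c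
        · rw [if_pos hin, if_pos (by omega)]
          have h2 : b - 1 - (j - (a+1)) = b - (j - a) := by omega
          rw [h2]
        · rw [if_neg hin, if_neg (by omega), List.getElem?_set_ne (by omega)]

lemma pvOuterA_spec (signal : List Int) (m : Nat) (hn : signal.length = 2 ^ m) :
    ∀ (d k f : Nat) (ns : List Int), 1 ≤ k → k + d = m → d ≤ f → ns.length = signal.length →
    (∀ j, j < 2 ^ k → ns[j]? = some (pvE signal j)) →
    ∀ j, j < signal.length →
    (pvOuterA signal f ns ((2 ^ k : Nat) : Int) ((2 ^ k : Nat) : Int))[j]? = some (pvE signal j) := by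
  intro d
  induction d with
  | zero =>
    intro k f ns hk hkm hf hlen hinv j hj
    have hkm' : k = m := by omega
    subst hkm'
    have hstop : ¬ ((2 ^ k : Nat) : Int) < (signal.length : Int) := by
      rw [hn]; omega
    have heq : pvOuterA signal f ns ((2 ^ k : Nat) : Int) ((2 ^ k : Nat) : Int) = ns := by
      cases f with
      | zero => rfl
      | succ f => simp only [pvOuterA]; rw [if_neg hstop]
    rw [heq]
    exact hinv j (by omega)
  | succ d ih =>
    intro k f ns hk hkm hf hlen hinv j hj
    have hkm' : k < m := by omega
    have hp1 : (0:Nat) < 2 ^ k := Nat.two_pow_pos k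
    have hlt : ((2 ^ k : Nat) : Int) < (signal.length : Int) := by
      rw [hn]
      have : (2:Nat) ^ k < 2 ^ m := Nat.pow_lt_pow_right (by omega) hkm'
      omega
    obtain ⟨f', rfl⟩ : ∃ f', f = f' + 1 := ⟨f - 1, by omega⟩
    rw [show pvOuterA signal (f'+1) ns ((2 ^ k : Nat) : Int) ((2 ^ k : Nat) : Int) =
      if ((2 ^ k : Nat) : Int) < (signal.length : Int) then
        pvOuterA signal f'
          (pvInnerA signal ((2 ^ k : Nat) : Int).toNat ns ((2 ^ k : Nat) : Int)
            (((2 ^ k : Nat) : Int) + ((2 ^ k : Nat) : Int) - 1))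
          (((2 ^ k : Nat) : Int) + ((2 ^ k : Nat) : Int)) (((2 ^ k : Nat) : Int) <<< (1:Nat))
      else ns from rfl, if_pos hlt]
    have ep : (2:Nat) ^ (k+1) = 2 ^ k * 2 := by rw [pow_succ]
    have ea : ((2 ^ k : Nat) : Int) + ((2 ^ k : Nat) : Int) = ((2 ^ (k+1) : Nat) : Int) := by
      rw [ep]; push_cast; ring
    have eb : ((2 ^ (k+1) : Nat) : Int) - 1 = ((2 ^ (k+1) - 1 : Nat) : Int) := by
      rw [ep]; push_cast [Nat.cast_sub (by omega : (1:Nat) ≤ 2 ^ k * 2)]; ring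
    have es : ((2 ^ k : Nat) : Int) <<< (1:Nat) = ((2 ^ (k+1) : Nat) : Int) := by
      rw [ep]; push_cast [Int.shiftLeft_eq]; ring
    rw [Int.toNat_natCast, ea, eb, es]
    set ns' := pvInnerA signal (2 ^ k) ns ((2 ^ k : Nat) : Int) ((2 ^ (k+1) - 1 : Nat) : Int) with hns'
    refine ih (k+1) f' ns' (by omega) (by omega) (by omega)
      (by rw [hns', pvInnerA_length, hlen]) ?_ j hj
    intro j' hj'
    rw [hns', pvInnerA_getElem? signal (2^k) ns (2^k) (2^(k+1)-1) (by rw [ep]; omega) j'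
      (by rw [hlen, hn]
          exact lt_of_lt_of_le hj' (Nat.pow_le_pow_right (by omega) (by omega)))]
    by_cases hcase : 2^k ≤ j'
    · rw [if_pos ⟨hcase, by rw [ep] at hj'; omega⟩]
      congr 1
      have hidx : 2^(k+1) - 1 - (j' - 2^k) = 3 * 2^k - 1 - j' := by
        rw [ep]; omega
      rw [hidx]
      have hlog : Nat.log2 j' = k := by
        rw [Nat.log2_eq_log_two]; exact Nat.log_eq_of_pow_le_of_lt_pow hcase hj'
      have hj2 : ¬ j' < 2 := by
        have : (2:Nat) ≤ 2^k :=
          le_trans (by norm_num) (Nat.pow_le_pow_right (by omega) hk)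
        omega
      rw [pvE, if_neg hj2, hlog, PySem.List.pyGet?_natCast,
        List.getD_eq_getElem?_getD]
    · rw [if_neg (by omega)]
      exact hinv j' (by omega)

lemma scrambled_flip_getElem? (signal : List Int) (h : Pre_scrambled_flip signal) (j : Nat) :
    (scrambled_flip signal)[j]? = if j < signal.length then some (pvE signal j) else none := by
  obtain ⟨h2, hpow⟩ := h
  set m := Nat.log2 signal.length with hm
  have hm1 : 1 ≤ m := by
    by_contra hc
    have : m = 0 := by omega
    rw [this] at hpow; omega
  have hlen2 : (scrambled_flip signal).length = signal.length := by
    unfold scrambled_flip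
    rw [pvOuterA_length]
    simp
  by_cases hj : j < signal.length
  · rw [if_pos hj]
    show (pvOuterA signal signal.length
      (((List.replicate signal.length (0:Int)).set 0 ((PySem.List.pyGet? signal 0).getD 0)).set 1
        ((PySem.List.pyGet? signal 1).getD 0)) 2 2)[j]? = some (pvE signal j)
    rw [show (2:Int) = ((2^1 : Nat) : Int) by norm_num]
    apply pvOuterA_spec signal m hpow (m - 1) 1 signal.length _ (by omega) (by omega)
      (by have := Nat.lt_two_pow_self (n := m); omega) (by simp) _ j hj
    intro j' hj'
    interval_cases j'
    · rw [List.getElem?_set_ne (by omega), List.getElem?_set_self (by simpa using by omega)]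
      rw [pvE, if_pos (by omega), PySem.List.pyGet?_zero, List.getD_eq_getElem?_getD]
    · rw [List.getElem?_set_self (by simpa using by omega)]
      rw [pvE, if_pos (by omega), show (1:Int) = ((1:Nat):Int) by norm_num,
        PySem.List.pyGet?_natCast, List.getD_eq_getElem?_getD]
  · rw [if_neg hj]
    exact List.getElem?_eq_none_iff.mpr (by omega)

-- per-element form of B's loop body (proof-side helper)
def gB (signal : List Int) (i : Nat) : Int :=
  let k := PySem.Int.bitLength (i : Int) - 1
  (PySem.List.pyGet? signal (3 * ((1 : Int) <<< k) - 1 - (i : Int))).getD 0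

lemma gB_eq_pvE (signal : List Int) (i : Nat) (hi : 2 ≤ i) : gB signal i = pvE signal i := by
  have hbl : PySem.Int.bitLength (i:Int) - 1 = Nat.log2 i := by
    have h1 := PySem.Int.lt_two_pow_bitLength (i:Int)
    have h2' := PySem.Int.two_pow_bitLength_le (i:Int) (by simp; omega)
    rw [Int.natAbs_natCast] at h1 h2'
    have hbl1 : 1 ≤ PySem.Int.bitLength (i:Int) := by
      by_contra hc
      have h0 : PySem.Int.bitLength (i:Int) = 0 := by omega
      rw [h0] at h1
      simp at h1
      omega
    symm
    rw [Nat.log2_eq_log_two]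
    apply Nat.log_eq_of_pow_le_of_lt_pow h2'
    rwa [Nat.sub_add_cancel hbl1]
  show (PySem.List.pyGet? signal
      (3 * ((1 : Int) <<< (PySem.Int.bitLength (i : Int) - 1)) - 1 - (i : Int))).getD 0 = _
  rw [hbl]
  set K := Nat.log2 i with hK
  have hi2K : i < 2 ^ (K + 1) := Nat.lt_log2_self
  have hKpos : (0:Nat) < 2 ^ K := Nat.two_pow_pos K
  have hsh : ((1:Int) <<< K) = ((2 ^ K : Nat) : Int) := by simp [Int.shiftLeft_eq]
  have hidx : 3 * ((1:Int) <<< K) - 1 - (i:Int) = ((3 * 2 ^ K - 1 - i : Nat) : Int) := by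
    rw [hsh]
    have : i + 1 ≤ 3 * 2 ^ K := by
      have : (2:Nat) ^ (K+1) = 2 ^ K * 2 := by rw [pow_succ]
      omega
    push_cast [Nat.cast_sub (by omega : (1:Nat) ≤ 3 * 2 ^ K),
      Nat.cast_sub (by omega : i ≤ 3 * 2 ^ K - 1)]
    ring
  rw [hidx, PySem.List.pyGet?_natCast, pvE, if_neg (by omega), hK,
    List.getD_eq_getElem?_getD]

lemma scrambled_flip_alt_getElem? (signal : List Int) (h : Pre_scrambled_flip signal) (j : Nat) :
    (scrambled_flip_alt signal)[j]? = if j < signal.length then some (pvE signal j) else none := by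
  obtain ⟨h2, _⟩ := h
  have hB : scrambled_flip_alt signal =
      [(PySem.List.pyGet? signal 0).getD 0, (PySem.List.pyGet? signal 1).getD 0] ++
        (List.range' 2 (signal.length - 2)).map (gB signal) := by
    simp only [scrambled_flip_alt]
    exact PySem.List.foldl_append_singleton_eq_map (gB signal)
      (List.range' 2 (signal.length - 2)) _
  rw [hB]
  simp only [List.cons_append, List.nil_append]
  by_cases hj : j < signal.length
  · rw [if_pos hj]
    match j, hj with
    | 0, _ =>
      rw [List.getElem?_cons_zero, pvE, if_pos (by omega), PySem.List.pyGet?_zero,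
        List.getD_eq_getElem?_getD]
    | 1, _ =>
      rw [List.getElem?_cons_succ, List.getElem?_cons_zero, pvE, if_pos (by omega),
        show (1:Int) = ((1:Nat):Int) by norm_num, PySem.List.pyGet?_natCast,
        List.getD_eq_getElem?_getD]
    | (j+2), hj =>
      rw [List.getElem?_cons_succ, List.getElem?_cons_succ, List.getElem?_map]
      have hjlt : j < signal.length - 2 := by omega
      rw [List.getElem?_range' hjlt]
      simp only [Option.map_some, one_mul]
      rw [gB_eq_pvE signal (2 + j) (by omega), show 2 + j = j + 2 by omega]
  · rw [if_neg hj]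
    apply List.getElem?_eq_none_iff.mpr
    simp
    omega

-- ===== VERDICT (by name: the statement is the Claim_ definition above) =====
theorem scrambled_flip_spec : Claim_equal_scrambled_flip := by
  intro signal _ hpre
  unfold Spec_scrambled_flip
  apply List.ext_getElem?
  intro j
  rw [scrambled_flip_getElem? signal hpre j, scrambled_flip_alt_getElem? signal hpre j]
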